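-- pv_equiv track=rewrite | github.com/absanyal/my-python-projects | segments-in-combinations/main.py | has_b_consecutive_ones
-- ===== SOURCE A (Python) =====
-- def has_b_consecutive_ones(combination, b):
--     count = 0
--     for bit in combination:
--         if bit == 1:
--             count += 1
--             if count >= b:
--                 return True
--         else:
--             count = 0
--     return False
-- ===== SOURCE B (Python) =====
-- def has_b_consecutive_ones(combination, b):
--     # Decompose the list into maximal runs of equal values, collect the
--     # lengths of the runs of 1s, then test whether any run is long enough.
--     n = len(combination)
--     runs = []
--     i = 0
--     while i < n:
--         j = i
--         while j < n and combination[j] == combination[i]: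
--             j += 1
--         if combination[i] == 1:
--             runs.append(j - i)
--         i = j
--     return any(r >= b for r in runs)
-- ===== Notes on version B (the rewrite author's own statement) =====
-- stated objective: alternative
-- what changed: Replaces A's single-pass counter-with-reset scan by a run-length decomposition: B first splits the list into maximal runs of equal values, collects the lengths of the runs of 1s, and then tests whether any run length reaches b.
import Mathlib
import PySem

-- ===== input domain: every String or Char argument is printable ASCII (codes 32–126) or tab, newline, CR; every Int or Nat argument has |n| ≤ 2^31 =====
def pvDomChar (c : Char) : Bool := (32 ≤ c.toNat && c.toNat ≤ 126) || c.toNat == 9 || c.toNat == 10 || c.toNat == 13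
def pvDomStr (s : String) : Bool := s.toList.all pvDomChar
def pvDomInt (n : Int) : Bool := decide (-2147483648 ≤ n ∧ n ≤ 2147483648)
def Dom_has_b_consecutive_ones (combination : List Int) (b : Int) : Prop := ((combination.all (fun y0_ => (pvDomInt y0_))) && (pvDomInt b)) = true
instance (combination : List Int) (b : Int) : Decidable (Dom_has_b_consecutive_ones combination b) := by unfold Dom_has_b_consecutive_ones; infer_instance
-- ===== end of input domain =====

-- B replaces A's counter-with-reset scan by a run-length decomposition (split the list
-- into maximal runs of equal values, then test the lengths of the 1-runs); alternative
-- structure, same cost.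

-- ===== PORT A =====
-- A's for-loop with its `count` accumulator and early return.
def pvLoopA (b : Int) : List Int → Int → Bool
  | [], _ => false
  | bit :: rest, count =>
    if bit = 1 then
      (if b ≤ count + 1 then true else pvLoopA b rest (count + 1))
    else pvLoopA b rest 0

def has_b_consecutive_ones (combination : List Int) (b : Int) : Bool :=
  pvLoopA b combination 0

-- ===== PORT B =====
-- B's inner while loop: length of the leading block of elements equal to v.
def pvLeadLen (v : Int) : List Int → Nat
  | [] => 0
  | y :: ys => if y = v then pvLeadLen v ys + 1 else 0

-- B's outer while loop: the lengths of the maximal runs of 1s, left to right.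
def pvRuns : List Int → List Nat
  | [] => []
  | x :: xs =>
    let k := pvLeadLen x xs
    if x = 1 then (k + 1) :: pvRuns (xs.drop k) else pvRuns (xs.drop k)
termination_by xs => xs.length
decreasing_by all_goals { simp only [List.length_drop, List.length_cons]; omega }

def has_b_consecutive_ones_alt (combination : List Int) (b : Int) : Bool :=
  (pvRuns combination).any (fun r => decide (b ≤ (r : Int)))

-- ===== PRECONDITION & SPEC =====
def Spec_has_b_consecutive_ones (combination : List Int) (b : Int) (out : Bool) : Prop := out = has_b_consecutive_ones_alt combination b
instance (combination : List Int) (b : Int) (out : Bool) : Decidable (Spec_has_b_consecutive_ones combination b out) := by unfold Spec_has_b_consecutive_ones; infer_instance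

-- ===== CLAIM (what is proved, stated in full; the proofs are below) =====
def Claim_equal_has_b_consecutive_ones : Prop := ∀ (combination : List Int) (b : Int), Dom_has_b_consecutive_ones combination b → Spec_has_b_consecutive_ones combination b (has_b_consecutive_ones combination b)

-- ===== LEMMAS AND PROOFS =====

-- "some run of 1s of length ≥ b" over a list of run lengths
def pvAnyB (b : Int) (gs : List Nat) : Bool := gs.any (fun r => decide (b ≤ (r : Int)))

-- right-hand side of the loop invariant pvKey below: B's run test with the
-- partially consumed leading run of 1s (if any) credited with the count c
def pvRhs (b c : Int) : List Int → Bool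
  | [] => false
  | x :: rest =>
    if x = 1 then
      (decide (b ≤ c + 1 + (pvLeadLen 1 rest : Int))
        || pvAnyB b (pvRuns (rest.drop (pvLeadLen 1 rest))))
    else pvAnyB b (pvRuns (x :: rest))

theorem pvRuns_nil : pvRuns [] = [] := by rw [pvRuns]

theorem pvRuns_cons (x : Int) (xs : List Int) :
    pvRuns (x :: xs) =
      (if x = 1 then (pvLeadLen x xs + 1) :: pvRuns (xs.drop (pvLeadLen x xs))
       else pvRuns (xs.drop (pvLeadLen x xs))) := by
  rw [pvRuns]

theorem pvLoopA_one (b c : Int) (rest : List Int) :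
    pvLoopA b (1 :: rest) c = (decide (b ≤ c + 1) || pvLoopA b rest (c + 1)) := by
  simp only [pvLoopA, if_pos rfl]
  by_cases hb : b ≤ c + 1 <;> simp [hb]

-- absorption of the early-return test into the full-run test
theorem pvOrAbsorb (b c L : Int) (h : 0 ≤ L) (X : Bool) :
    (decide (b ≤ c) || (decide (b ≤ c + L) || X)) = (decide (b ≤ c + L) || X) := by
  by_cases hb : b ≤ c
  · have h2 : b ≤ c + L := by omega
    simp [hb, h2]
  · simp [hb]

-- Main invariant: A's loop from count c equals B's run test with the leading
-- run of 1s credited with c.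
theorem pvKey (b : Int) : ∀ (xs : List Int) (c : Int),
    pvLoopA b xs c = pvRhs b c xs := by
  intro xs
  induction xs with
  | nil => intro c; simp [pvLoopA, pvRhs]
  | cons x rest ih =>
    intro c
    by_cases hx : x = 1
    · subst hx
      rw [pvLoopA_one, ih (c + 1)]
      cases rest with
      | nil =>
        simp only [pvRhs, pvLeadLen, eq_self_iff_true, if_true, List.drop_nil,
          pvRuns_nil, pvAnyB, List.any_nil, Bool.or_false, Nat.cast_zero,
          add_zero, decide_eq_decide]
      | cons y t =>
        by_cases hy : y = 1
        · subst hy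
          have hlead : pvLeadLen 1 (1 :: t) = pvLeadLen 1 t + 1 := by
            simp [pvLeadLen]
          simp only [pvRhs, eq_self_iff_true, if_true, hlead, List.drop_succ_cons,
            Nat.cast_add, Nat.cast_one]
          have e1 : decide (b ≤ c + 1 + 1 + (pvLeadLen 1 t : Int))
              = decide (b ≤ c + 1 + (1 + (pvLeadLen 1 t : Int))) := by
            simp only [decide_eq_decide]; omega
          have e2 : decide (b ≤ c + 1 + ((pvLeadLen 1 t : Int) + 1))
              = decide (b ≤ c + 1 + (1 + (pvLeadLen 1 t : Int))) := by
            simp only [decide_eq_decide]; omega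
          rw [e1, e2, pvOrAbsorb]
          have := Int.natCast_nonneg (pvLeadLen 1 t)
          omega
        · have hlead : pvLeadLen 1 (y :: t) = 0 := by simp [pvLeadLen, hy]
          simp only [pvRhs, eq_self_iff_true, if_true, if_neg hy, hlead,
            List.drop_zero, Nat.cast_zero, add_zero]
    · simp only [pvLoopA, if_neg hx]
      rw [ih 0]
      have h1x : ¬(1:Int) = x := fun h => hx h.symm
      cases rest with
      | nil =>
        simp only [pvRhs, if_neg hx]
        rw [pvRuns_cons, if_neg hx]
        simp [pvLeadLen, pvRuns_nil, pvAnyB]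
      | cons y t =>
        by_cases hy : y = 1
        · subst hy
          have hlead : pvLeadLen x (1 :: t) = 0 := by simp [pvLeadLen, h1x]
          simp only [pvRhs, eq_self_iff_true, if_true, if_neg hx]
          rw [pvRuns_cons x, if_neg hx, hlead, List.drop_zero,
            pvRuns_cons 1, if_pos rfl]
          simp only [pvAnyB, List.any_cons]
          congr 1
          simp only [decide_eq_decide]
          push_cast
          omega
        · by_cases hyx : y = x
          · subst hyx
            have h1 : pvLeadLen y (y :: t) = pvLeadLen y t + 1 := by
              simp [pvLeadLen]
            simp only [pvRhs, if_neg hy, if_neg hx]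
            rw [pvRuns_cons y, if_neg hy, pvRuns_cons y, if_neg hy, h1,
              List.drop_succ_cons]
          · have h0 : pvLeadLen x (y :: t) = 0 := by simp [pvLeadLen, hyx]
            simp only [pvRhs, if_neg hy, if_neg hx]
            rw [pvRuns_cons x, if_neg hx, h0, List.drop_zero]

-- ===== VERDICT (by name: the statement is the Claim_ definition above) =====
theorem has_b_consecutive_ones_spec : Claim_equal_has_b_consecutive_ones := by
  intro combination b _
  unfold Spec_has_b_consecutive_ones has_b_consecutive_ones
  rw [pvKey b combination 0]
  cases combination with
  | nil => simp [pvRhs, pvRuns_nil, has_b_consecutive_ones_alt]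
  | cons x rest =>
    by_cases hx : x = 1
    · subst hx
      simp only [pvRhs, eq_self_iff_true, if_true]
      unfold has_b_consecutive_ones_alt
      rw [pvRuns_cons 1, if_pos rfl]
      simp only [pvAnyB, List.any_cons]
      congr 1
      simp only [decide_eq_decide]
      push_cast
      omega
    · rw [show pvRhs b 0 (x :: rest) = pvAnyB b (pvRuns (x :: rest)) from by
        simp [pvRhs, hx]]
      rfl
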